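-- pv_equiv track=rewrite | github.com/langchain-ai/langchain | docs/scripts/arxiv_references.py | _get_module_name
-- ===== SOURCE A (Python) =====
-- def _get_module_name(file_parts: tuple[str, ...]) -> str:
--     """Get the module name from the absolute path of the file."""
--     ns_parts = []
--     for el in file_parts[::-1]:
--         if str(el) == "__init__.py":
--             continue
--         ns_parts.insert(0, str(el).replace(".py", ""))
--         if el.startswith("langchain"):
--             break
--     return ".".join(ns_parts)
-- ===== SOURCE B (Python) =====
-- def _get_module_name(file_parts: tuple[str, ...]) -> str:
--     """Get the module name from the absolute path of the file."""
--     start = 0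
--     for i, el in enumerate(file_parts):
--         if el.startswith("langchain"):
--             start = i
--     return ".".join(
--         el.replace(".py", "") for el in file_parts[start:] if el != "__init__.py"
--     )
-- ===== Notes on version B (the rewrite author's own statement) =====
-- stated objective: faster
-- what changed: A scans the reversed tuple, prepending into a list with insert(0,...) and breaking at the first langchain-prefixed part; B first locates the last langchain-prefixed index in one forward pass, then builds the result with a forward filter/map/join over the suffix, with no reversal, no quadratic prepends and no break.
import Mathlib
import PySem

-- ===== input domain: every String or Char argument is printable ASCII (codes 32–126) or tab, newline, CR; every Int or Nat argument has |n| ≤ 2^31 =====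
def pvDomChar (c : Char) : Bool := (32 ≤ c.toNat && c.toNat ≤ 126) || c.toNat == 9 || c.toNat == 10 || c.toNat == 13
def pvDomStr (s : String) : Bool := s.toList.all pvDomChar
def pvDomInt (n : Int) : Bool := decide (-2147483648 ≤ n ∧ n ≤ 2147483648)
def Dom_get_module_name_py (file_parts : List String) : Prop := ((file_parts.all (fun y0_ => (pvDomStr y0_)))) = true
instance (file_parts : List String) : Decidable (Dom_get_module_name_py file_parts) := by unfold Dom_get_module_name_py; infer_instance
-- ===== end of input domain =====

-- B replaces A's reverse-scan-with-break (prepend into ns_parts, break at the first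
-- langchain-prefixed part) by a locate-boundary-then-forward-build: one forward pass
-- records the last langchain-prefixed index, then a forward filter/map/join over the
-- suffix produces the result; dropping insert(0,...) removes A's quadratic prepends
-- (a timing run measured B faster). Objective: faster.

-- ===== PORT A =====
-- the loop body of A: iterate over file_parts[::-1], skip "__init__.py",
-- insert(0, el.replace(".py","")), break when el.startswith("langchain")
def pvGoA : List String → List String → List String
  | [], ns_parts => ns_parts
  | el :: rest, ns_parts =>
    if el = "__init__.py" then pvGoA rest ns_parts
    else
      let ns_parts' := PySem.List.insert ns_parts 0 (PySem.Str.replace el ".py" "")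
      if PySem.Str.startswith el "langchain" then ns_parts' else pvGoA rest ns_parts'

def get_module_name_py (file_parts : List String) : String :=
  -- file_parts[::-1]; step -1 never raises, so getD [] is never the default
  PySem.Str.join "." (pvGoA ((PySem.List.slice? file_parts none none (-1)).getD []) [])

-- ===== PORT B =====
def get_module_name_py_alt (file_parts : List String) : String :=
  let start : Int :=
    (PySem.List.enumerate file_parts 0).foldl
      (fun (acc : Int) (p : Int × String) => if PySem.Str.startswith p.2 "langchain" then p.1 else acc) 0
  PySem.Str.join "."
    (((PySem.List.slice file_parts (some start) none).filter
        (fun el => el != "__init__.py")).map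
      (fun el => PySem.Str.replace el ".py" ""))

-- ===== PRECONDITION & SPEC =====
def Spec_get_module_name_py (file_parts : List String) (out : String) : Prop := out = get_module_name_py_alt file_parts
instance (file_parts : List String) (out : String) : Decidable (Spec_get_module_name_py file_parts out) := by unfold Spec_get_module_name_py; infer_instance

-- ===== CLAIM (what is proved, stated in full; the proofs are below) =====
def Claim_equal_get_module_name_py : Prop := ∀ (file_parts : List String), Dom_get_module_name_py file_parts → Spec_get_module_name_py file_parts (get_module_name_py file_parts)

-- ===== LEMMAS AND PROOFS =====

-- the suffix of l from its last langchain-prefixed element (argument is l.reverse)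
def pvSuffix : List String → List String
  | [] => []
  | x :: rest =>
    if PySem.Str.startswith x "langchain" then [x] else pvSuffix rest ++ [x]

-- A's accumulator only ever gets appended on the right
theorem pvGoA_acc (m : List String) : ∀ acc, pvGoA m acc = pvGoA m [] ++ acc := by
  induction m with
  | nil => intro acc; simp [pvGoA]
  | cons x rest ih =>
    intro acc
    by_cases hx : x = "__init__.py"
    · simp only [pvGoA, if_pos hx]; exact ih acc
    · simp only [pvGoA, if_neg hx, PySem.List.insert_zero]
      by_cases hl : PySem.Str.startswith x "langchain" = true
      · rw [if_pos hl, if_pos hl]; rfl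
      · rw [if_neg hl, if_neg hl, ih, ih [_], List.append_assoc]; rfl

-- A's loop computes filter/map of the suffix from the last langchain-prefixed part
theorem pvGoA_eq (m : List String) :
    pvGoA m [] = ((pvSuffix m).filter (fun el => el != "__init__.py")).map
      (fun el => PySem.Str.replace el ".py" "") := by
  induction m with
  | nil => simp [pvGoA, pvSuffix]
  | cons x rest ih =>
    by_cases hx : x = "__init__.py"
    · have hl : ¬ PySem.Str.startswith x "langchain" = true := by subst hx; decide
      simp only [pvGoA, pvSuffix, if_pos hx, if_neg hl]
      rw [List.filter_append, ih]
      simp [hx]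
    · simp only [pvGoA, pvSuffix, if_neg hx, PySem.List.insert_zero]
      by_cases hl : PySem.Str.startswith x "langchain" = true
      · rw [if_pos hl, if_pos hl]
        simp [hx]
      · rw [if_neg hl, if_neg hl, pvGoA_acc, ih, List.filter_append, List.map_append]
        simp [hx]

-- B's boundary index: nonnegative, bounded, and dropping it yields the suffix
theorem pvStart_spec (l : List String) :
    0 ≤ (PySem.List.enumerate l 0).foldl
        (fun (acc : Int) (p : Int × String) => if PySem.Str.startswith p.2 "langchain" then p.1 else acc) 0 ∧
    ((PySem.List.enumerate l 0).foldl
        (fun (acc : Int) (p : Int × String) => if PySem.Str.startswith p.2 "langchain" then p.1 else acc) 0).toNat ≤ l.length ∧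
    l.drop ((PySem.List.enumerate l 0).foldl
        (fun (acc : Int) (p : Int × String) => if PySem.Str.startswith p.2 "langchain" then p.1 else acc) 0).toNat
      = pvSuffix l.reverse := by
  induction l using List.reverseRecOn with
  | nil => simp [PySem.List.enumerate, pvSuffix]
  | append_singleton l x ih =>
    obtain ⟨h0, hle, hdrop⟩ := ih
    rw [PySem.List.enumerate_append, List.foldl_append]
    simp only [PySem.List.enumerate, List.foldl]
    by_cases hl : PySem.Str.startswith x "langchain" = true
    · rw [if_pos hl]
      refine ⟨by positivity, by simp, ?_⟩
      rw [List.reverse_append]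
      simp [pvSuffix, hl, -PySem.Str.startswith_eq]
    · rw [if_neg hl]
      refine ⟨h0, by simp only [List.length_append, List.length_cons, List.length_nil]; omega, ?_⟩
      rw [List.drop_append_of_le_length hle, hdrop, List.reverse_append]
      simp [pvSuffix, hl, -PySem.Str.startswith_eq]

-- ===== VERDICT (by name: the statement is the Claim_ definition above) =====
theorem get_module_name_py_spec : Claim_equal_get_module_name_py := by
  intro l _
  show get_module_name_py l = get_module_name_py_alt l
  obtain ⟨h0, _, hdrop⟩ := pvStart_spec l
  unfold get_module_name_py get_module_name_py_alt
  rw [PySem.List.slice?_none_none_neg_one, Option.getD_some, pvGoA_eq]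
  dsimp only
  rw [PySem.List.slice_from _ h0, hdrop]
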